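-- pv_equiv track=rewrite | github.com/luis-angel-montiel-moreno/efriend | efriend-maic-stable/src/inte_universal.py | formato
-- ===== SOURCE A (Python) =====
-- def ajusta_bl(cadena):
--   if "\n " in  cadena: cade1= ajusta_bl(cadena.replace("\n ", "\n"))
--   else: cade1=cadena
--   return cade1
--
-- def incerta_cl(cadena):
--   if "&" in  cadena: cade1= incerta_cl(cadena.replace("&", "\n"))
--   else: cade1=cadena
--   return cade1
--
-- def formato(lista):
--   cadena=[]
--   for j in range(0,len(lista)):
--    if lista[j][0]=="{":  cadena += [ lista[j][1: ].replace("}","") ]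
--    else:
--      cade= lista[j].replace("\n","")
--      cade1= cade.replace(".", ".\n")
--      cade2= cade1.replace("?", "?\n")
--      cade3= cade2.replace(":)", ":)\n")
--      cade4= cade3.replace("!", ":\n")
--      cadena += [ incerta_cl(ajusta_bl(cade4.lstrip()))]
--   cad1=""
--   cad1 = cad1.join(cadena)
--   return cad1
-- ===== SOURCE B (Python) =====
-- def formato(lista):
--     def fix(s):
--         if s.startswith("{"):
--             return s[1:].replace("}", "")
--         t = (s.replace("\n", "").replace(".", ".\n").replace("?", "?\n")
--               .replace(":)", ":)\n").replace("!", ":\n").lstrip())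
--         out = []
--         skip = False
--         for ch in t:
--             if skip and ch == ' ':
--                 continue
--             out.append(ch)
--             skip = ch == '\n'
--         return ''.join(out).replace("&", "\n")
--     return ''.join(fix(s) for s in lista)
-- ===== Notes on version B (the rewrite author's own statement) =====
-- stated objective: alternative
-- what changed: The recursive whole-string rescans ajusta_bl (repeatedly replacing '\n ' until a fixpoint) and incerta_cl are replaced by a single left-to-right state-machine pass that skips spaces after a newline, followed by one '&'->'\n' replace; the outer index loop becomes a per-element map joined once.
import Mathlib
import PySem

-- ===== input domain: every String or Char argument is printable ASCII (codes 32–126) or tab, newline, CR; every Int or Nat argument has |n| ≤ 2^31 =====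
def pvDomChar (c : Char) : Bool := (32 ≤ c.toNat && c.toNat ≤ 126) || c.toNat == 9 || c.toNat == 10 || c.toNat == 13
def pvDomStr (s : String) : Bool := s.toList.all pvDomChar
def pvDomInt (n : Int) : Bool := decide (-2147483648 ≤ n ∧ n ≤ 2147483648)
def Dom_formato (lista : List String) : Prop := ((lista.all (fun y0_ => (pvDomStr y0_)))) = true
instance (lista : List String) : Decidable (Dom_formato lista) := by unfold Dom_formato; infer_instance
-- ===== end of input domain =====

-- B replaces the recursive whole-string rescans (ajusta_bl / incerta_cl) by a single-pass
-- state machine over the characters plus one final replace; equivalence of return values.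

-- ===== PORT A =====
-- recursive characterisation of PySem.Chars.replace (for old ≠ []), cited by the
-- termination arguments of ajustaBl/incertaCl below
def pvRep (old new : List Char) : List Char → List Char
  | [] => []
  | c :: t =>
    if old.isPrefixOf (c :: t) then new ++ pvRep old new (t.drop (old.length - 1))
    else c :: pvRep old new t
termination_by l => l.length
decreasing_by
  · simpa using Nat.lt_succ_of_le (t.length_drop _ ▸ Nat.sub_le _ _)
  · simp

theorem pvRep_nil (old new : List Char) : pvRep old new [] = [] := by
  rw [pvRep.eq_def]

theorem pvRep_cons (old new : List Char) (c : Char) (t : List Char) :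
    pvRep old new (c :: t) =
      if old.isPrefixOf (c :: t) then new ++ pvRep old new (t.drop (old.length - 1))
      else c :: pvRep old new t := by
  rw [pvRep.eq_def]

theorem pvRep_go (old new : List Char) (hold : old ≠ []) :
    ∀ (fuel : Nat) (l acc : List Char), l.length ≤ fuel →
      PySem.Chars.replace.go old new fuel l acc = acc.reverse ++ pvRep old new l := by
  intro fuel
  induction fuel with
  | zero =>
    intro l acc h
    rw [PySem.Chars.replace.go.eq_def]
    cases l with
    | nil => simp [pvRep_nil]
    | cons c t => simp at h
  | succ n ih =>
    intro l acc h
    rw [PySem.Chars.replace.go.eq_def]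
    cases l with
    | nil => simp [pvRep_nil]
    | cons c t =>
      rw [pvRep_cons]
      obtain ⟨o, os, rfl⟩ : ∃ o os, old = o :: os := by
        cases old with
        | nil => exact absurd rfl hold
        | cons o os => exact ⟨o, os, rfl⟩
      by_cases hp : (o :: os).isPrefixOf (c :: t) = true
      · simp only [hp, if_true]
        have hdrop : List.drop (o :: os).length (c :: t) = t.drop ((o :: os).length - 1) := by
          simp
        rw [hdrop, ih]
        · simp
        · have : (t.drop ((o :: os).length - 1)).length ≤ t.length := by
            rw [List.length_drop]; omega
          simp at h; omega
      · simp only [hp, if_false]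
        rw [ih t (c :: acc) (by simp at h; omega)]
        simp

theorem pvReplace_eq (l old new : List Char) (h : old ≠ []) :
    PySem.Chars.replace l old new = pvRep old new l := by
  rw [PySem.Chars.replace]
  simp only [List.isEmpty_iff, h, if_false]
  simpa using pvRep_go old new h l.length l [] le_rfl

theorem pvRep_nl_length_le (l : List Char) :
    (pvRep ['\n', ' '] ['\n'] l).length ≤ l.length := by
  fun_induction pvRep with
  | case1 => simp [pvRep_nil]
  | case2 c t hp ih =>
    have ht : 1 ≤ t.length := by
      have := (List.isPrefixOf_iff_prefix.mp hp).length_le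
      simp at this; omega
    rw [List.length_drop] at ih
    simp at ih ⊢
    omega
  | case3 c t hp ih =>
    simp
    omega

theorem pvRep_nl_length_lt (l : List Char) (h : ['\n', ' '] <:+: l) :
    (pvRep ['\n', ' '] ['\n'] l).length < l.length := by
  fun_induction pvRep with
  | case1 => simp at h
  | case2 c t hp ih =>
    have ht : 1 ≤ t.length := by
      have := (List.isPrefixOf_iff_prefix.mp hp).length_le
      simp at this; omega
    have := pvRep_nl_length_le (t.drop (['\n', ' '].length - 1))
    rw [List.length_drop] at this
    simp at this ⊢
    omega
  | case3 c t hp ih =>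
    have hti : ['\n', ' '] <:+: t := by
      rcases (List.infix_cons_iff).mp h with h1 | h2
      · exact absurd (List.isPrefixOf_iff_prefix.mpr h1) (by simpa using hp)
      · exact h2
    have := ih hti
    simp
    omega

def ajustaBl (cadena : List Char) : List Char :=
  if PySem.Chars.isIn ['\n', ' '] cadena then
    ajustaBl (PySem.Chars.replace cadena ['\n', ' '] ['\n'])
  else cadena
termination_by cadena.length
decreasing_by
  rw [pvReplace_eq _ _ _ (by simp)]
  exact pvRep_nl_length_lt _ ((PySem.Chars.isIn_iff_infix _ _).mp (by assumption))

theorem amp_not_mem_pvRep (l : List Char) : '&' ∉ pvRep ['&'] ['\n'] l := by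
  fun_induction pvRep with
  | case1 => simp [pvRep_nil]
  | case2 c t hp ih =>
    intro hm
    rcases List.mem_append.mp hm with h | h
    · simp at h
    · exact ih h
  | case3 c t hp ih =>
    intro hm
    rcases List.mem_cons.mp hm with h | h
    · subst h; simp [List.isPrefixOf] at hp
    · exact ih h

theorem amp_not_in_replace (l : List Char) :
    PySem.Chars.isIn ['&'] (PySem.Chars.replace l ['&'] ['\n']) = false := by
  rw [pvReplace_eq _ _ _ (by simp), (PySem.Chars.isIn_eq_false_iff _ _),
      List.singleton_infix_iff]
  exact amp_not_mem_pvRep l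

def incertaCl (cadena : List Char) : List Char :=
  if PySem.Chars.isIn ['&'] cadena then
    incertaCl (PySem.Chars.replace cadena ['&'] ['\n'])
  else cadena
termination_by (if PySem.Chars.isIn ['&'] cadena then 1 else 0)
decreasing_by
  rename_i h
  simp [h, amp_not_in_replace]

def formato (lista : List String) : String :=
  let cadena :=
    (PySem.List.pyRange 0 (lista.length : Int)).foldl (fun cadena j =>
      let s := (PySem.List.pyGetD lista j "").toList
      match s with
      | [] => cadena  -- Python raises IndexError at lista[j][0]; excluded by Pre_formato
      | c :: _ =>
        if c == '{' then
          cadena ++ [PySem.Chars.replace (PySem.List.slice s (some 1) none) ['}'] []]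
        else
          let cade := PySem.Chars.replace s ['\n'] []
          let cade1 := PySem.Chars.replace cade ['.'] ['.', '\n']
          let cade2 := PySem.Chars.replace cade1 ['?'] ['?', '\n']
          let cade3 := PySem.Chars.replace cade2 [':', ')'] [':', ')', '\n']
          let cade4 := PySem.Chars.replace cade3 ['!'] [':', '\n']
          cadena ++ [incertaCl (ajustaBl (PySem.Chars.lstrip cade4))]) ([] : List (List Char))
  String.mk (PySem.Chars.join [] cadena)

-- ===== PORT B =====
def fixElem (s : String) : List Char :=
  let cs := s.toList
  if PySem.Chars.startswith cs ['{'] then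
    PySem.Chars.replace (PySem.List.slice cs (some 1) none) ['}'] []
  else
    let t := PySem.Chars.lstrip
      (PySem.Chars.replace
        (PySem.Chars.replace
          (PySem.Chars.replace
            (PySem.Chars.replace
              (PySem.Chars.replace cs ['\n'] []) ['.'] ['.', '\n']) ['?'] ['?', '\n'])
          [':', ')'] [':', ')', '\n']) ['!'] [':', '\n'])
    let r := t.foldl (fun (st : List Char × Bool) ch =>
      if st.2 && (ch == ' ') then st else (st.1 ++ [ch], ch == '\n')) ([], false)
    PySem.Chars.replace r.1 ['&'] ['\n']

def formato_alt (lista : List String) : String :=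
  String.mk (PySem.Chars.join [] (lista.map fixElem))

-- ===== PRECONDITION & SPEC =====
-- Pre_ excludes lists containing an empty string: there A raises IndexError (lista[j][0]).
def Pre_formato (lista : List String) : Prop := ∀ s ∈ lista, s ≠ ""
instance (lista : List String) : Decidable (Pre_formato lista) := by unfold Pre_formato; infer_instance
def pvWitness_formato : List String := ["hola. mundo! ok", "{x}y"]

def Spec_formato (lista : List String) (out : String) : Prop := out = formato_alt lista
instance (lista : List String) (out : String) : Decidable (Spec_formato lista out) := by unfold Spec_formato; infer_instance

-- ===== CLAIM (what is proved, stated in full; the proofs are below) =====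
def Claim_equal_formato : Prop := ∀ (lista : List String), Dom_formato lista → Pre_formato lista → Spec_formato lista (formato lista)

-- ===== LEMMAS AND PROOFS =====

-- the single-pass collapse of B, as a recursion (spec of B's foldl state machine)
def pvNorm : Bool → List Char → List Char
  | _, [] => []
  | skip, c :: t => if skip && (c == ' ') then pvNorm skip t else c :: pvNorm (c == '\n') t

theorem foldl_collapse (l : List Char) :
    ∀ (acc : List Char) (skip : Bool),
      (l.foldl (fun (st : List Char × Bool) ch =>
        if st.2 && (ch == ' ') then st else (st.1 ++ [ch], ch == '\n')) (acc, skip)).1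
      = acc ++ pvNorm skip l := by
  induction l with
  | nil => intro acc skip; simp [pvNorm]
  | cons c t ih =>
    intro acc skip
    rw [List.foldl_cons, pvNorm]
    by_cases h : (skip && (c == ' ')) = true
    · simp only [h, if_true]
      exact ih acc skip
    · rw [Bool.not_eq_true] at h
      simp only [h, if_false, Bool.false_eq_true]
      rw [ih (acc ++ [c]) (c == '\n')]
      simp

theorem pvNorm_id : ∀ (skip : Bool) (l : List Char),
    ¬ (['\n', ' '] <:+: l) → (skip = true → l.head? ≠ some ' ') → pvNorm skip l = l := by
  intro skip l
  induction l generalizing skip with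
  | nil => intro _ _; simp [pvNorm]
  | cons c t ih =>
    intro hinf hh
    rw [pvNorm]
    have hcs : (skip && (c == ' ')) = false := by
      cases skip with
      | false => simp
      | true =>
        simp only [Bool.true_and]
        cases hcc : (c == ' ') with
        | false => rfl
        | true =>
          have hc : c = ' ' := by simpa using hcc
          exact absurd (by simp [hc] : (c :: t).head? = some ' ') (hh rfl)
    simp only [hcs, Bool.false_eq_true, if_false]
    have hti : ¬ (['\n', ' '] <:+: t) := fun hx => hinf (hx.trans (List.suffix_cons c t).isInfix)
    have hh2 : (c == '\n') = true → t.head? ≠ some ' ' := by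
      intro hcn hhd
      simp at hcn
      apply hinf
      cases t with
      | nil => simp at hhd
      | cons d u =>
        simp at hhd
        exact (show ['\n', ' '] <+: c :: d :: u from ⟨u, by simp [hcn, hhd]⟩).isInfix
    rw [ih _ hti hh2]

theorem pvNorm_pvRep (l : List Char) : ∀ (skip : Bool),
    pvNorm skip (pvRep ['\n', ' '] ['\n'] l) = pvNorm skip l := by
  fun_induction pvRep with
  | case1 => intro skip; rfl
  | case2 c t hp ih =>
    intro skip
    obtain ⟨r, hr⟩ := List.isPrefixOf_iff_prefix.mp hp
    rw [List.cons_append, List.cons_append, List.nil_append] at hr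
    injection hr with h1 h2
    subst h1
    subst h2
    have hdrop : List.drop (['\n', ' '].length - 1) (' ' :: r) = r := by simp
    rw [hdrop] at ih ⊢
    have e1 : ('\n' == ' ') = false := rfl
    have e2 : ('\n' == '\n') = true := rfl
    have e3 : (' ' == ' ') = true := rfl
    simp only [List.singleton_append, pvNorm, e1, e2, e3, Bool.and_false, Bool.and_true,
      Bool.true_and, Bool.false_eq_true, if_false, if_true, ih]
  | case3 c t hp ih =>
    intro skip
    simp only [pvNorm]
    by_cases h : (skip && (c == ' ')) = true
    · simp only [h, if_true]; exact ih skip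
    · rw [Bool.not_eq_true] at h
      simp only [h, Bool.false_eq_true, if_false]
      rw [ih]

theorem ajustaBl_eq_pvNorm (l : List Char) : ajustaBl l = pvNorm false l := by
  fun_induction ajustaBl with
  | case1 l h ih =>
    rw [ih, pvReplace_eq _ _ _ (by simp), pvNorm_pvRep]
  | case2 l h =>
    rw [pvNorm_id false l _ (by simp)]
    rw [Bool.not_eq_true] at h
    exact (PySem.Chars.isIn_eq_false_iff _ _).mp h

theorem pvRep_amp_id (l : List Char) (h : '&' ∉ l) : pvRep ['&'] ['\n'] l = l := by
  induction l with
  | nil => exact pvRep_nil _ _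
  | cons c t ih =>
    rw [pvRep_cons]
    simp only [List.mem_cons, not_or] at h
    have hpf : (['&'].isPrefixOf (c :: t)) = false := by
      cases hcc : ('&' == c) with
      | false => simp [List.isPrefixOf, hcc]
      | true => exact absurd (by simpa using hcc : '&' = c) h.1
    rw [hpf]
    simp only [Bool.false_eq_true, if_false]
    rw [ih h.2]

theorem incertaCl_eq_replace (l : List Char) :
    incertaCl l = PySem.Chars.replace l ['&'] ['\n'] := by
  fun_induction incertaCl with
  | case1 l h ih =>
    rw [ih]
    rw [pvReplace_eq _ _ _ (by simp : (['&'] : List Char) ≠ []),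
        pvReplace_eq _ _ _ (by simp : (['&'] : List Char) ≠ [])]
    rw [pvRep_amp_id _ (amp_not_mem_pvRep l)]
  | case2 l h =>
    rw [pvReplace_eq _ _ _ (by simp : (['&'] : List Char) ≠ [])]
    rw [pvRep_amp_id]
    rw [Bool.not_eq_true] at h
    rw [← List.singleton_infix_iff]
    exact (PySem.Chars.isIn_eq_false_iff _ _).mp h

-- A's per-element computation, on the character list of the (nonempty) element
def pvAFix (s : List Char) : List Char :=
  match s with
  | [] => []
  | c :: _ =>
    if c == '{' then
      PySem.Chars.replace (PySem.List.slice s (some 1) none) ['}'] []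
    else
      let cade := PySem.Chars.replace s ['\n'] []
      let cade1 := PySem.Chars.replace cade ['.'] ['.', '\n']
      let cade2 := PySem.Chars.replace cade1 ['?'] ['?', '\n']
      let cade3 := PySem.Chars.replace cade2 [':', ')'] [':', ')', '\n']
      let cade4 := PySem.Chars.replace cade3 ['!'] [':', '\n']
      incertaCl (ajustaBl (PySem.Chars.lstrip cade4))

theorem pvAFix_eq_fixElem (s : String) (h : s ≠ "") : pvAFix s.toList = fixElem s := by
  obtain ⟨c, t, hs⟩ : ∃ c t, s.toList = c :: t := by
    cases hx : s.toList with
    | nil => exact absurd (String.toList_eq_nil_iff.mp hx) h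
    | cons c t => exact ⟨c, t, rfl⟩
  rw [fixElem]
  simp only [hs]
  rw [pvAFix]
  have hsw : PySem.Chars.startswith (c :: t) ['{'] = (c == '{') := by
    simp only [PySem.Chars.startswith, List.isPrefixOf, Bool.and_true]
    by_cases hx : c = '{'
    · simp [hx]
    · simp [hx]
      exact Ne.symm hx
  rw [hsw]
  by_cases hc : (c == '{') = true
  · simp only [hc, if_true]
  · rw [Bool.not_eq_true] at hc
    simp only [hc, Bool.false_eq_true, if_false]
    rw [incertaCl_eq_replace, ajustaBl_eq_pvNorm, foldl_collapse]
    rw [List.nil_append]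

theorem formato_fold_take (lista : List String) (h : ∀ s ∈ lista, s ≠ "") :
    ∀ n, n ≤ lista.length →
      ((List.range n).map (fun (k : Nat) => (k : Int))).foldl (fun cadena j =>
        let s := (PySem.List.pyGetD lista j "").toList
        match s with
        | [] => cadena
        | c :: _ =>
          if c == '{' then
            cadena ++ [PySem.Chars.replace (PySem.List.slice s (some 1) none) ['}'] []]
          else
            let cade := PySem.Chars.replace s ['\n'] []
            let cade1 := PySem.Chars.replace cade ['.'] ['.', '\n']
            let cade2 := PySem.Chars.replace cade1 ['?'] ['?', '\n']
            let cade3 := PySem.Chars.replace cade2 [':', ')'] [':', ')', '\n']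
            let cade4 := PySem.Chars.replace cade3 ['!'] [':', '\n']
            cadena ++ [incertaCl (ajustaBl (PySem.Chars.lstrip cade4))]) ([] : List (List Char))
      = (lista.take n).map (fun s => pvAFix s.toList) := by
  intro n
  induction n with
  | zero => intro _; simp
  | succ m ih =>
    intro hm
    rw [List.range_succ, List.map_append, List.foldl_append, ih (by omega)]
    have hmlt : m < lista.length := by omega
    have hgd : PySem.List.pyGetD lista ((m : Nat) : Int) "" = lista[m] := by
      rw [PySem.List.pyGetD_natCast]
      exact List.getD_eq_getElem lista "" hmlt
    have hne : lista[m] ≠ "" := h _ (List.getElem_mem hmlt)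
    obtain ⟨c, t, hs⟩ : ∃ c t, (lista[m]).toList = c :: t := by
      cases hx : (lista[m]).toList with
      | nil => exact absurd (String.toList_eq_nil_iff.mp hx) hne
      | cons c t => exact ⟨c, t, rfl⟩
    rw [List.take_succ, List.map_append, List.getElem?_eq_getElem hmlt]
    simp only [List.map_cons, List.map_nil, List.foldl_cons, List.foldl_nil, hgd, hs]
    simp only [Option.toList_some, List.map_cons, List.map_nil, hs]
    rw [pvAFix.eq_def]
    simp only [hs]
    by_cases hc : (c == '{') = true
    · simp only [hc, if_true]
    · rw [Bool.not_eq_true] at hc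
      simp only [hc, Bool.false_eq_true, if_false]

theorem formato_eq (lista : List String) (h : ∀ s ∈ lista, s ≠ "") :
    formato lista = formato_alt lista := by
  rw [formato, formato_alt]
  rw [show ((lista.length : Nat) : Int) = ((lista.length : Nat) : Int) from rfl]
  rw [PySem.List.pyRange_zero_natCast]
  rw [formato_fold_take lista h lista.length le_rfl]
  rw [List.take_length]
  congr 1
  congr 1
  apply List.map_congr_left
  intro s hs
  exact pvAFix_eq_fixElem s (h s hs)

-- ===== VERDICT (by name: the statement is the Claim_ definition above) =====
theorem formato_spec : Claim_equal_formato := by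
  intro lista _ hpre
  unfold Spec_formato
  exact formato_eq lista hpre
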